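-- pv_equiv track=rewrite | github.com/ChessZra/LC | 2266-minimum-cost-to-set-cooking-time/minimum-cost-to-set-cooking-time.py | minCostSetTime
-- ===== SOURCE A (Python) =====
-- def minCostSetTime(startAt: int, moveCost: int, pushCost: int, targetSeconds: int) -> int:
--     INF = 10 ** 20
--     def go(x):
--         # test if equal to targetSeconds
--         temp = '0' * (4 - len(x)) + x
--         x_to_seconds = (int(temp[:-2]) * 60 + int(temp[-2:]))
--         if x_to_seconds != targetSeconds:
--             return INF
--
--         cur = str(startAt)
--         total_moves_cost = 0
--         for char in x:
--             if char != cur: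
--                 total_moves_cost += moveCost
--             cur = char
--         total_push_cost = len(x) * pushCost
--
--         return total_push_cost + total_moves_cost
--
--     best = INF
--     for x in range(1, 10000):
--         best = min(best, go(str(x)))
--     return best
-- ===== SOURCE B (Python) =====
-- def minCostSetTime(startAt: int, moveCost: int, pushCost: int, targetSeconds: int) -> int:
--     INF = 10 ** 20
--
--     def cost(num):
--         s = str(num)
--         cur = str(startAt)
--         c = len(s) * pushCost
--         for ch in s:
--             if ch != cur:
--                 c += moveCost
--             cur = ch
--         return c
--
--     best = INF
--     m, s = divmod(targetSeconds, 60)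
--     for mm, ss in ((m, s), (m - 1, s + 60)):
--         if 0 <= mm <= 99 and 0 <= ss <= 99:
--             num = mm * 100 + ss
--             if 1 <= num <= 9999:
--                 best = min(best, cost(num))
--     return best
-- ===== Notes on version B (the rewrite author's own statement) =====
-- stated objective: faster
-- what changed: Instead of scanning all 9999 display values and testing each against targetSeconds, B computes divmod(targetSeconds, 60) and evaluates only the at-most-two valid mm:ss encodings of targetSeconds.
import Mathlib
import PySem

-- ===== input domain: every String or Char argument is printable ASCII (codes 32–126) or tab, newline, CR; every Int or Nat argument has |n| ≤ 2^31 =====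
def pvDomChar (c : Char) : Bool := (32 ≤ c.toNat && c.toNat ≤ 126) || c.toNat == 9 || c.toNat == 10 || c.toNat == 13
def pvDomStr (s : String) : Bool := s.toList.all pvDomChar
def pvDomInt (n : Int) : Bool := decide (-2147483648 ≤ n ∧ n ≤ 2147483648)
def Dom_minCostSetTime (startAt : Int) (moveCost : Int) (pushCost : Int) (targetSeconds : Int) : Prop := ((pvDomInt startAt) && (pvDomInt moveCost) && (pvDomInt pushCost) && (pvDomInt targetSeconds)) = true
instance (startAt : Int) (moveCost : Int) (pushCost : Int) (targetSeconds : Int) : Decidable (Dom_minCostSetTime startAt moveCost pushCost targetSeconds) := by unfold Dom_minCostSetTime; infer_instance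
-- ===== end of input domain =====

-- B replaces A's scan of all 9999 display values by direct evaluation of the at most two
-- mm:ss encodings of targetSeconds (objective: faster, constant number of candidates instead of 9999).

-- ===== PORT A =====
-- A's `temp = '0' * (4 - len(x)) + x`: Python repeats the character max(k,0) times, exactly as
-- Nat subtraction clamps, so List.replicate (4 - len) is exact here.
-- A's `int(temp[:-2])` / `int(temp[-2:])`: `.getD 0` marks int()'s ValueError, unreachable here
-- because temp is always a digit string.
def pvParseA (x : String) : Int :=
  let temp := String.ofList (List.replicate (4 - x.toList.length) '0' ++ x.toList)
  ((PySem.Int.ofStr? (PySem.Str.slice temp none (some (-2)))).getD 0) * 60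
    + (PySem.Int.ofStr? (PySem.Str.slice temp (some (-2)) none)).getD 0

-- the inner function `go` of A (INF = 10 ** 20)
def pvGoA (startAt : Int) (moveCost : Int) (pushCost : Int) (targetSeconds : Int) (x : String) : Int :=
  let x_to_seconds := pvParseA x
  if x_to_seconds ≠ targetSeconds then 10 ^ 20
  else
    -- `cur = str(startAt)` then `for char in x: if char != cur: … ; cur = char`
    let r := x.toList.foldl
      (fun (p : Int × String) ch =>
        (if String.singleton ch ≠ p.2 then p.1 + moveCost else p.1, String.singleton ch))
      (0, PySem.Int.toStr startAt)
    let total_push_cost := (PySem.Str.len x) * pushCost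
    total_push_cost + r.1

def minCostSetTime (startAt : Int) (moveCost : Int) (pushCost : Int) (targetSeconds : Int) : Int :=
  (PySem.List.pyRange 1 10000 1).foldl
    (fun best x => min best (pvGoA startAt moveCost pushCost targetSeconds (PySem.Int.toStr x)))
    (10 ^ 20)

-- ===== PORT B =====
-- Source B's helper `cost(num)`: keypress cost of typing str(num) starting from str(startAt)
def pvCostB (startAt : Int) (moveCost : Int) (pushCost : Int) (num : Int) : Int :=
  let s := PySem.Int.toStr num
  (s.toList.foldl
    (fun (p : Int × String) ch =>
      (if String.singleton ch ≠ p.2 then p.1 + moveCost else p.1, String.singleton ch))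
    ((PySem.Str.len s) * pushCost, PySem.Int.toStr startAt)).1

def minCostSetTime_alt (startAt : Int) (moveCost : Int) (pushCost : Int) (targetSeconds : Int) : Int :=
  let m := PySem.Int.floordiv targetSeconds 60
  let s := PySem.Int.mod targetSeconds 60
  [(m, s), (m - 1, s + 60)].foldl
    (fun best p =>
      if 0 ≤ p.1 ∧ p.1 ≤ 99 ∧ 0 ≤ p.2 ∧ p.2 ≤ 99 then
        let num := p.1 * 100 + p.2
        if 1 ≤ num ∧ num ≤ 9999 then min best (pvCostB startAt moveCost pushCost num) else best
      else best)
    (10 ^ 20)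

-- ===== PRECONDITION & SPEC =====
def Spec_minCostSetTime (startAt : Int) (moveCost : Int) (pushCost : Int) (targetSeconds : Int) (out : Int) : Prop := out = minCostSetTime_alt startAt moveCost pushCost targetSeconds
instance (startAt : Int) (moveCost : Int) (pushCost : Int) (targetSeconds : Int) (out : Int) : Decidable (Spec_minCostSetTime startAt moveCost pushCost targetSeconds out) := by unfold Spec_minCostSetTime; infer_instance

-- ===== CLAIM (what is proved, stated in full; the proofs are below) =====
def Claim_equal_minCostSetTime : Prop := ∀ (startAt : Int) (moveCost : Int) (pushCost : Int) (targetSeconds : Int), Dom_minCostSetTime startAt moveCost pushCost targetSeconds → Spec_minCostSetTime startAt moveCost pushCost targetSeconds (minCostSetTime startAt moveCost pushCost targetSeconds)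

-- ===== LEMMAS AND PROOFS =====

-- Nat.toDigits (what str(n) produces for n ≥ 0) is the reversed decimal digit list
lemma pv_toDigitsCore_eq : ∀ (f n : Nat) (acc : List Char), 0 < n → n < f →
    Nat.toDigitsCore 10 f n acc = ((Nat.digits 10 n).map Nat.digitChar).reverse ++ acc := by
  intro f
  induction f with
  | zero => intro n acc h1 h2; omega
  | succ f ih =>
    intro n acc h1 h2
    rw [Nat.toDigitsCore]
    rw [Nat.digits_def' (by norm_num : (1:Nat) < 10) h1]
    by_cases h10 : n / 10 = 0
    · have hn10 : n < 10 := by omega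
      have : Nat.digits 10 (n / 10) = [] := by simp [h10]
      simp [h10, Nat.mod_eq_of_lt hn10]
    · have hlt : n / 10 < f := by
        have := Nat.div_lt_self h1 (by norm_num : (1:Nat) < 10)
        omega
      rw [if_neg h10, ih (n / 10) _ (Nat.pos_of_ne_zero h10) hlt]
      simp

lemma pv_toChars_eq (n : Nat) (h : 0 < n) :
    PySem.Int.toChars (n : Int) = ((Nat.digits 10 n).map Nat.digitChar).reverse := by
  unfold PySem.Int.toChars
  rw [if_neg (by omega), Nat.toDigits]
  have := pv_toDigitsCore_eq (n + 1) n [] h (by omega)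
  simpa [Int.toNat_natCast] using this

lemma pv_ofDigits_replicate_zero : ∀ m : Nat, Nat.ofDigits 10 (List.replicate m 0) = 0 := by
  intro m
  induction m with
  | zero => simp
  | succ m ih => simp [List.replicate_succ, Nat.ofDigits, ih]

-- int() of a two-digit-character string
lemma pv_parse2 : ∀ a : Nat, a < 10 → ∀ b : Nat, b < 10 →
    PySem.Int.ofChars? [Nat.digitChar a, Nat.digitChar b] = some ((10 * a + b : Nat) : Int) := by
  decide

-- the parse in A's `go` computes mm*60+ss of the zero-padded 4-digit display
lemma pv_parseA_eq (n : Nat) (h1 : 0 < n) (h2 : n < 10000) :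
    pvParseA (PySem.Int.toStr (n : Int))
      = ((n / 100 : Nat) : Int) * 60 + ((n % 100 : Nat) : Int) := by
  have hchars : (PySem.Int.toStr (n : Int)).toList = ((Nat.digits 10 n).map Nat.digitChar).reverse := by
    rw [PySem.Int.toList_toStr, pv_toChars_eq n h1]
  have hk : (Nat.digits 10 n).length ≤ 4 := by
    rw [Nat.digits_length_le_iff (by norm_num)]; omega
  -- the padded digit list, little-endian, with its facts, before destructing it
  set D := Nat.digits 10 n ++ List.replicate (4 - (Nat.digits 10 n).length) 0 with hD
  have hDlen : D.length = 4 := by simp [hD]; omega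
  have hDlt : ∀ d ∈ D, d < 10 := by
    intro d hd
    rcases List.mem_append.mp hd with h | h
    · exact Nat.digits_lt_base (by norm_num) h
    · have := List.eq_of_mem_replicate h; omega
  have hDval : Nat.ofDigits 10 D = n := by
    rw [hD, Nat.ofDigits_append, pv_ofDigits_replicate_zero, Nat.ofDigits_digits]
    ring
  have htemp : List.replicate (4 - (PySem.Int.toStr (n : Int)).toList.length) '0'
        ++ (PySem.Int.toStr (n : Int)).toList = (D.map Nat.digitChar).reverse := by
    rw [hchars, hD]
    simp only [List.map_append, List.reverse_append, List.map_replicate, List.reverse_replicate,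
      List.length_reverse, List.length_map]
    rw [show Nat.digitChar 0 = '0' from rfl]
  rcases D with _ | ⟨d0, _ | ⟨d1, _ | ⟨d2, _ | ⟨d3, _ | _⟩⟩⟩⟩ <;> simp at hDlen
  have h0 : d0 < 10 := hDlt d0 (by simp)
  have h1' : d1 < 10 := hDlt d1 (by simp)
  have h2' : d2 < 10 := hDlt d2 (by simp)
  have h3 : d3 < 10 := hDlt d3 (by simp)
  have hval : d0 + 10 * (d1 + 10 * (d2 + 10 * d3)) = n := by
    simpa [Nat.ofDigits] using hDval
  unfold pvParseA
  rw [htemp]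
  simp only [List.map_cons, List.map_nil, List.reverse_cons, List.reverse_nil,
    List.nil_append, List.cons_append]
  -- temp = [digitChar d3, digitChar d2, digitChar d1, digitChar d0]; take/drop the slices
  unfold PySem.Int.ofStr? PySem.Str.slice
  rw [PySem.Chars.slice_eq_listSlice, PySem.Chars.slice_eq_listSlice]
  rw [String.toList_ofList, String.toList_ofList, String.toList_ofList]
  rw [PySem.List.slice_to_neg_ofNat _ 2 (by norm_num), PySem.List.slice_from_neg_ofNat _ 2 (by norm_num)]
  simp only [List.length_cons, List.length_nil]
  norm_num
  rw [pv_parse2 d3 h3 d2 h2', pv_parse2 d1 h1' d0 h0]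
  simp only [Option.getD_some]
  have hdiv : n / 100 = 10 * d3 + d2 := by omega
  have hmod : n % 100 = 10 * d1 + d0 := by omega
  push_cast
  omega

-- the moves accumulator starts at 0 in A and at len*pushCost in B; it is additive in its start
lemma pv_fold_fst_add (moveCost : Int) :
    ∀ (l : List Char) (a : Int) (cur : String),
    (l.foldl (fun (p : Int × String) ch =>
        (if String.singleton ch ≠ p.2 then p.1 + moveCost else p.1, String.singleton ch)) (a, cur)).1
      = a + (l.foldl (fun (p : Int × String) ch =>
        (if String.singleton ch ≠ p.2 then p.1 + moveCost else p.1, String.singleton ch)) (0, cur)).1 := by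
  intro l
  induction l with
  | nil => intro a cur; simp
  | cons c l ih =>
    intro a cur
    simp only [List.foldl_cons]
    by_cases h : String.singleton c ≠ cur
    · rw [if_pos h, if_pos h, ih (a + moveCost), ih (0 + moveCost)]
      ring
    · rw [if_neg h, if_neg h, ih a]

-- `go(str(x))` in arithmetic form, for x in the scanned range
lemma pv_goA_eq (startAt moveCost pushCost targetSeconds : Int) (x : Int)
    (hx1 : 1 ≤ x) (hx2 : x < 10000) :
    pvGoA startAt moveCost pushCost targetSeconds (PySem.Int.toStr x)
      = if (x / 100) * 60 + x % 100 = targetSeconds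
        then pvCostB startAt moveCost pushCost x else 10 ^ 20 := by
  obtain ⟨n, rfl⟩ : ∃ n : Nat, x = (n : Int) := ⟨x.toNat, by omega⟩
  have hn1 : 0 < n := by omega
  have hn2 : n < 10000 := by omega
  have hparse := pv_parseA_eq n hn1 hn2
  have hcast : ((n / 100 : Nat) : Int) * 60 + ((n % 100 : Nat) : Int)
      = ((n : Int) / 100) * 60 + (n : Int) % 100 := by push_cast; omega
  unfold pvGoA pvCostB
  rw [hparse, hcast]
  by_cases h : ((n : Int) / 100) * 60 + (n : Int) % 100 = targetSeconds
  · rw [if_neg (by simpa using h), if_pos h]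
    rw [pv_fold_fst_add]
  · rw [if_pos (by simpa using h), if_neg h]

-- entries mapped to the top constant can be dropped from a running minimum
lemma pv_foldl_min_filter (g : Int → Int) (p : Int → Bool) (I : Int) :
    ∀ (l : List Int) (b : Int), (∀ x ∈ l, p x = false → g x = I) → b ≤ I →
    l.foldl (fun a x => min a (g x)) b = (l.filter p).foldl (fun a x => min a (g x)) b := by
  intro l
  induction l with
  | nil => intro b _ _; rfl
  | cons x l ih =>
    intro b hinf hb
    by_cases hp : p x
    · rw [List.filter_cons_of_pos hp]
      simp only [List.foldl_cons]
      exact ih _ (fun y hy => hinf y (List.mem_cons_of_mem x hy))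
        (le_trans (min_le_left _ _) hb)
    · rw [List.filter_cons_of_neg hp]
      simp only [List.foldl_cons]
      rw [hinf x List.mem_cons_self (by simpa using hp), min_eq_left hb]
      exact ih _ (fun y hy => hinf y (List.mem_cons_of_mem x hy)) hb

lemma pv_filter_singleton_of_sorted :
    ∀ (l : List Int), l.Pairwise (· < ·) → ∀ a ∈ l, l.filter (fun x => x == a) = [a] := by
  intro l
  induction l with
  | nil => intro _ a ha; simp at ha
  | cons y l ih =>
    intro hp a ha
    have hy : ∀ z ∈ l, y < z := fun z hz => (List.pairwise_cons.mp hp).1 z hz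
    have hp' : l.Pairwise (· < ·) := (List.pairwise_cons.mp hp).2
    rcases List.mem_cons.mp ha with rfl | ha'
    · rw [List.filter_cons_of_pos (by simp)]
      have : l.filter (fun x => x == a) = [] := by
        rw [List.filter_eq_nil_iff]
        intro z hz
        have := hy z hz
        simp only [beq_iff_eq]
        omega
      rw [this]
    · have hne : y ≠ a := by have := hy a ha'; omega
      rw [List.filter_cons_of_neg (by simpa using hne)]
      exact ih hp' a ha'

lemma pv_filter_pair_of_sorted :
    ∀ (l : List Int), l.Pairwise (· < ·) → ∀ a b : Int, a < b → a ∈ l → b ∈ l →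
    l.filter (fun x => x == a || x == b) = [a, b] := by
  intro l
  induction l with
  | nil => intro _ a b _ ha _; simp at ha
  | cons y l ih =>
    intro hp a b hab ha hb
    have hy : ∀ z ∈ l, y < z := fun z hz => (List.pairwise_cons.mp hp).1 z hz
    have hp' : l.Pairwise (· < ·) := (List.pairwise_cons.mp hp).2
    rcases List.mem_cons.mp ha with rfl | ha'
    · rw [List.filter_cons_of_pos (by simp)]
      have hbl : b ∈ l := by
        rcases List.mem_cons.mp hb with rfl | h
        · omega
        · exact h
      have : l.filter (fun x => x == a || x == b) = l.filter (fun x => x == b) := by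
        apply List.filter_congr
        intro z hz
        have hza : z ≠ a := by have := hy z hz; omega
        have : (z == a) = false := beq_eq_false_iff_ne.mpr hza
        simp [this]
      rw [this, pv_filter_singleton_of_sorted l hp' b hbl]
    · have hya : y ≠ a := by have := hy a ha'; omega
      have hbl : b ∈ l := by
        rcases List.mem_cons.mp hb with rfl | h
        · exfalso; have := hy a ha'; omega
        · exact h
      have hyb : y ≠ b := by have := hy b hbl; omega
      rw [List.filter_cons_of_neg (by simp [hya, hyb])]
      exact ih hp' a b hab ha' hbl

-- the two divmod encodings: which x in [1, 9999] satisfy mm*60+ss = t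
lemma pv_cand_char (t x : Int) (hx1 : 1 ≤ x) (hx2 : x < 10000) :
    ((x / 100) * 60 + x % 100 = t) ↔
      (((0 ≤ t / 60 ∧ t / 60 ≤ 99 ∧ 0 ≤ t % 60 ∧ t % 60 ≤ 99)
          ∧ (1 ≤ (t / 60) * 100 + t % 60 ∧ (t / 60) * 100 + t % 60 ≤ 9999)
          ∧ x = (t / 60) * 100 + t % 60)
        ∨ ((0 ≤ t / 60 - 1 ∧ t / 60 - 1 ≤ 99 ∧ 0 ≤ t % 60 + 60 ∧ t % 60 + 60 ≤ 99)
          ∧ (1 ≤ (t / 60 - 1) * 100 + (t % 60 + 60) ∧ (t / 60 - 1) * 100 + (t % 60 + 60) ≤ 9999)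
          ∧ x = (t / 60 - 1) * 100 + (t % 60 + 60))) := by
  omega

-- A's scan, with the non-matching values (which `go` sends to 10^20) filtered away
def pvG (startAt moveCost pushCost t : Int) (x : Int) : Int :=
  if (x / 100) * 60 + x % 100 = t then pvCostB startAt moveCost pushCost x else 10 ^ 20

lemma pv_A_filter (startAt moveCost pushCost t : Int) :
    minCostSetTime startAt moveCost pushCost t
      = ((PySem.List.pyRange 1 10000 1).filter
            (fun x => decide ((x / 100) * 60 + x % 100 = t))).foldl
          (fun a x => min a (pvG startAt moveCost pushCost t x)) (10 ^ 20) := by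
  unfold minCostSetTime
  rw [PySem.List.foldl_congr_mem _ _ (fun a x => min a (pvG startAt moveCost pushCost t x)) _ ?_]
  · exact pv_foldl_min_filter _ _ _ _ _
      (by
        intro x hx hpx
        unfold pvG
        rw [if_neg (of_decide_eq_false hpx)])
      le_rfl
  · intro acc x hx
    obtain ⟨hx1, hx2⟩ := PySem.List.mem_pyRange_one.mp hx
    rw [pv_goA_eq startAt moveCost pushCost t x hx1 hx2]
    rfl

-- ===== VERDICT (by name: the statement is the Claim_ definition above) =====
theorem minCostSetTime_spec : Claim_equal_minCostSetTime := by
  intro startAt moveCost pushCost t _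
  unfold Spec_minCostSetTime
  have hfd : PySem.Int.floordiv t 60 = t / 60 := by
    unfold PySem.Int.floordiv; rw [Int.fdiv_eq_ediv]; simp
  have hfm : PySem.Int.mod t 60 = t % 60 := by
    unfold PySem.Int.mod; rw [Int.fmod_eq_emod]; simp
  set m : Int := t / 60 with hm
  set s : Int := t % 60 with hs
  set c1 : Int := m * 100 + s with hc1
  set c2 : Int := (m - 1) * 100 + (s + 60) with hc2
  have hBeval : minCostSetTime_alt startAt moveCost pushCost t =
      (if (0 ≤ m - 1 ∧ m - 1 ≤ 99 ∧ 0 ≤ s + 60 ∧ s + 60 ≤ 99) ∧ (1 ≤ c2 ∧ c2 ≤ 9999)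
       then min (if (0 ≤ m ∧ m ≤ 99 ∧ 0 ≤ s ∧ s ≤ 99) ∧ (1 ≤ c1 ∧ c1 ≤ 9999)
                 then min (10 ^ 20) (pvCostB startAt moveCost pushCost c1) else 10 ^ 20)
                (pvCostB startAt moveCost pushCost c2)
       else (if (0 ≤ m ∧ m ≤ 99 ∧ 0 ≤ s ∧ s ≤ 99) ∧ (1 ≤ c1 ∧ c1 ≤ 9999)
             then min (10 ^ 20) (pvCostB startAt moveCost pushCost c1) else 10 ^ 20)) := by
    unfold minCostSetTime_alt
    rw [hfd, hfm]
    simp only [List.foldl_cons, List.foldl_nil, ← hc1, ← hc2]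
    by_cases h1a : 0 ≤ m ∧ m ≤ 99 ∧ 0 ≤ s ∧ s ≤ 99 <;>
      by_cases h1b : 1 ≤ c1 ∧ c1 ≤ 9999 <;>
        by_cases h2a : 0 ≤ m - 1 ∧ m - 1 ≤ 99 ∧ 0 ≤ s + 60 ∧ s + 60 ≤ 99 <;>
          by_cases h2b : 1 ≤ c2 ∧ c2 ≤ 9999 <;>
            simp [h1a, h1b, h2a, h2b]
  rw [pv_A_filter, hBeval]
  have hts : t = 60 * m + s ∧ 0 ≤ s ∧ s < 60 := by
    refine ⟨?_, Int.emod_nonneg t (by norm_num), Int.emod_lt_of_pos t (by norm_num)⟩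
    rw [hm, hs]; omega
  have hchar : ∀ x : Int, x ∈ PySem.List.pyRange 1 10000 1 →
      (decide ((x / 100) * 60 + x % 100 = t)
        = decide (((0 ≤ m ∧ m ≤ 99 ∧ 0 ≤ s ∧ s ≤ 99) ∧ (1 ≤ c1 ∧ c1 ≤ 9999) ∧ x = c1)
                ∨ ((0 ≤ m - 1 ∧ m - 1 ≤ 99 ∧ 0 ≤ s + 60 ∧ s + 60 ≤ 99) ∧ (1 ≤ c2 ∧ c2 ≤ 9999) ∧ x = c2))) := by
    intro x hx
    obtain ⟨hx1, hx2⟩ := PySem.List.mem_pyRange_one.mp hx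
    refine decide_eq_decide.mpr ?_
    rw [hc1, hc2, hm, hs]
    exact pv_cand_char t x hx1 hx2
  by_cases hV1 : (0 ≤ m ∧ m ≤ 99 ∧ 0 ≤ s ∧ s ≤ 99) ∧ (1 ≤ c1 ∧ c1 ≤ 9999) <;>
    by_cases hV2 : (0 ≤ m - 1 ∧ m - 1 ≤ 99 ∧ 0 ≤ s + 60 ∧ s + 60 ≤ 99) ∧ (1 ≤ c2 ∧ c2 ≤ 9999)
  · -- both encodings valid: A sees [c2, c1], B folds c1 then c2
    have hfilter : (PySem.List.pyRange 1 10000 1).filter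
        (fun x => decide ((x / 100) * 60 + x % 100 = t)) = [c2, c1] := by
      have hstep : ((PySem.List.pyRange 1 10000 1).filter
            (fun x => decide ((x / 100) * 60 + x % 100 = t)))
          = (PySem.List.pyRange 1 10000 1).filter (fun x => x == c2 || x == c1) :=
        List.filter_congr (fun x hx => by
          rw [hchar x hx]
          apply Bool.eq_iff_iff.mpr
          simp only [decide_eq_true_eq, Bool.or_eq_true, beq_iff_eq]
          constructor
          · rintro (⟨_, _, rfl⟩ | ⟨_, _, rfl⟩) <;> simp
          · intro h
            rcases h with rfl | rfl
            · exact Or.inr ⟨hV2.1, hV2.2, rfl⟩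
            · exact Or.inl ⟨hV1.1, hV1.2, rfl⟩)
      rw [hstep]
      exact pv_filter_pair_of_sorted _ (PySem.List.pairwise_lt_pyRange_one 1 10000) c2 c1
        (by omega) (PySem.List.mem_pyRange_one.mpr (by omega))
        (PySem.List.mem_pyRange_one.mpr (by omega))
    rw [hfilter, if_pos hV2, if_pos hV1]
    simp only [List.foldl_cons, List.foldl_nil]
    rw [show pvG startAt moveCost pushCost t c1 = pvCostB startAt moveCost pushCost c1 from
          if_pos (by omega),
        show pvG startAt moveCost pushCost t c2 = pvCostB startAt moveCost pushCost c2 from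
          if_pos (by omega)]
    exact min_right_comm _ _ _
  · -- only c1 valid
    have hfilter : (PySem.List.pyRange 1 10000 1).filter
        (fun x => decide ((x / 100) * 60 + x % 100 = t)) = [c1] := by
      have hstep : ((PySem.List.pyRange 1 10000 1).filter
            (fun x => decide ((x / 100) * 60 + x % 100 = t)))
          = (PySem.List.pyRange 1 10000 1).filter (fun x => x == c1) :=
        List.filter_congr (fun x hx => by
          rw [hchar x hx]
          apply Bool.eq_iff_iff.mpr
          simp only [decide_eq_true_eq, beq_iff_eq]
          constructor
          · rintro (⟨_, _, rfl⟩ | ⟨h2a, h2b, rfl⟩)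
            · rfl
            · exact absurd ⟨h2a, h2b⟩ hV2
          · rintro rfl
            exact Or.inl ⟨hV1.1, hV1.2, rfl⟩)
      rw [hstep]
      exact pv_filter_singleton_of_sorted _ (PySem.List.pairwise_lt_pyRange_one 1 10000) c1
        (PySem.List.mem_pyRange_one.mpr (by omega))
    rw [hfilter, if_neg hV2, if_pos hV1]
    simp only [List.foldl_cons, List.foldl_nil]
    rw [show pvG startAt moveCost pushCost t c1 = pvCostB startAt moveCost pushCost c1 from
          if_pos (by omega)]
  · -- only c2 valid
    have hfilter : (PySem.List.pyRange 1 10000 1).filter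
        (fun x => decide ((x / 100) * 60 + x % 100 = t)) = [c2] := by
      have hstep : ((PySem.List.pyRange 1 10000 1).filter
            (fun x => decide ((x / 100) * 60 + x % 100 = t)))
          = (PySem.List.pyRange 1 10000 1).filter (fun x => x == c2) :=
        List.filter_congr (fun x hx => by
          rw [hchar x hx]
          apply Bool.eq_iff_iff.mpr
          simp only [decide_eq_true_eq, beq_iff_eq]
          constructor
          · rintro (⟨h1a, h1b, rfl⟩ | ⟨_, _, rfl⟩)
            · exact absurd ⟨h1a, h1b⟩ hV1
            · rfl
          · rintro rfl
            exact Or.inr ⟨hV2.1, hV2.2, rfl⟩)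
      rw [hstep]
      exact pv_filter_singleton_of_sorted _ (PySem.List.pairwise_lt_pyRange_one 1 10000) c2
        (PySem.List.mem_pyRange_one.mpr (by omega))
    rw [hfilter, if_pos hV2, if_neg hV1]
    simp only [List.foldl_cons, List.foldl_nil]
    rw [show pvG startAt moveCost pushCost t c2 = pvCostB startAt moveCost pushCost c2 from
          if_pos (by omega)]
  · -- no valid encoding: both return 10 ^ 20
    have hfilter : (PySem.List.pyRange 1 10000 1).filter
        (fun x => decide ((x / 100) * 60 + x % 100 = t)) = [] := by
      rw [List.filter_eq_nil_iff]
      intro x hx hpx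
      rw [hchar x hx] at hpx
      rcases of_decide_eq_true hpx with ⟨h1a, h1b, _⟩ | ⟨h2a, h2b, _⟩
      · exact hV1 ⟨h1a, h1b⟩
      · exact hV2 ⟨h2a, h2b⟩
    rw [hfilter, if_neg hV2, if_neg hV1]
    rfl
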